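-- pv_equiv track=rewrite | github.com/AbdulRehman27604/Python-2024 | Assignment and quizzez/assignment4.py | get_range_of_factors
-- ===== SOURCE A (Python) =====
-- def get_range_of_factors(start, end):
--     """
--     >>> get_range_of_factors(10, 13)
--     1,2,5,10
--     1,11
--     1,2,3,4,6,12
--     >>> get_range_of_factors(2, 6)
--     1,2
--     1,3
--     1,2,4
--     1,5
--     >>> et_range_of_factors(0,0)
--     ''
--     """
--     result = ""
--     for num in range(start, end):
--         factors = [str(i) for i in range(1, num + 1) if num % i == 0]
--         for i in range(len(factors)):
--             result += factors[i]
--             if i < len(factors) - 1: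
--                 result += ","
--         result += "\n"
--     return result
-- ===== SOURCE B (Python) =====
-- def get_range_of_factors(start, end):
--     pieces = []
--     for num in range(start, end):
--         small = []
--         large = []
--         i = 1
--         while i * i <= num:
--             if num % i == 0:
--                 small.append(i)
--                 if i * i != num:
--                     large.append(num // i)
--             i += 1
--         pieces.append(",".join(str(d) for d in small + large[::-1]) + "\n")
--     return "".join(pieces)
-- ===== Notes on version B (the rewrite author's own statement) =====
-- stated objective: alternative
-- what changed: Each number's factors are found by trial division only up to sqrt(num), collecting each divisor d and its cofactor num//d (pairing instead of scanning 1..num), and lines are assembled with str.join instead of an indexed += loop.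
import Mathlib
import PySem

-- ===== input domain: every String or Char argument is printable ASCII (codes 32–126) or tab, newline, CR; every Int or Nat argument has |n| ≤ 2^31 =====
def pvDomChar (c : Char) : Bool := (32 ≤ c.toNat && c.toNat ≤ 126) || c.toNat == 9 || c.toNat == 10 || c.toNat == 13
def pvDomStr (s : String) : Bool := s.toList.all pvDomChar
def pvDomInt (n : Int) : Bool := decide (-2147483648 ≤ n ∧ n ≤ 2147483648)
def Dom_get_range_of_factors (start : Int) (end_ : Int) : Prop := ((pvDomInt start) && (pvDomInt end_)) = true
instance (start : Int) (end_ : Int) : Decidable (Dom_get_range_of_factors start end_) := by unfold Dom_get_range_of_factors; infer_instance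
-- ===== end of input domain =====

-- B lists each number's factors by a different algorithm: trial division up to sqrt(num),
-- pairing each divisor with its cofactor, and joins lines with str.join.

-- ===== PORT A =====
def get_range_of_factors (start : Int) (end_ : Int) : String :=
  let result : List Char := (PySem.List.pyRange start end_ 1).foldl (fun result num =>
    let factors : List (List Char) :=
      ((PySem.List.pyRange 1 (num + 1) 1).filter (fun i => PySem.Int.mod num i == 0)).map
        PySem.Int.toChars
    let result := (PySem.List.pyRange 0 (factors.length : Int) 1).foldl (fun result i =>
      let result := result ++ PySem.List.pyGetD factors i []
      if i < (factors.length : Int) - 1 then result ++ [','] else result) result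
    result ++ ['\n']) []
  String.ofList result

-- ===== PORT B =====
-- the 'while i * i <= num' trial-division loop of Source B (fuel = a totality guard only:
-- num.toNat + 1 iterations always suffice, since the loop stops once i exceeds num)
def pvFactorLoop (fuel : Nat) (num i : Int) (small large : List Int) : List Int × List Int :=
  match fuel with
  | 0 => (small, large)
  | fuel + 1 =>
    if i * i ≤ num then
      if PySem.Int.mod num i == 0 then
        if i * i == num then
          pvFactorLoop fuel num (i + 1) (small ++ [i]) large
        else
          pvFactorLoop fuel num (i + 1) (small ++ [i]) (large ++ [PySem.Int.floordiv num i])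
      else pvFactorLoop fuel num (i + 1) small large
    else (small, large)

def get_range_of_factors_alt (start : Int) (end_ : Int) : String :=
  let pieces : List (List Char) := (PySem.List.pyRange start end_ 1).map (fun num =>
    let p := pvFactorLoop (num.toNat + 1) num 1 [] []
    PySem.Chars.join [',']
      ((p.1 ++ ((PySem.List.slice? p.2 none none (-1)).getD [])).map PySem.Int.toChars)
      ++ ['\n'])
  String.ofList (PySem.Chars.join [] pieces)

-- ===== PRECONDITION & SPEC =====
def Spec_get_range_of_factors (start : Int) (end_ : Int) (out : String) : Prop := out = get_range_of_factors_alt start end_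
instance (start : Int) (end_ : Int) (out : String) : Decidable (Spec_get_range_of_factors start end_ out) := by unfold Spec_get_range_of_factors; infer_instance

-- ===== CLAIM (what is proved, stated in full; the proofs are below) =====
def Claim_equal_get_range_of_factors : Prop := ∀ (start : Int) (end_ : Int), Dom_get_range_of_factors start end_ → Spec_get_range_of_factors start end_ (get_range_of_factors start end_)

-- ===== LEMMAS AND PROOFS =====

-- A's factor list for one number
def pvFactA (num : Int) : List Int :=
  (PySem.List.pyRange 1 (num + 1) 1).filter (fun i => PySem.Int.mod num i == 0)

-- the small / large divisor lists the trial-division loop accumulates, from index i on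
def pvSmall (num i : Int) : List Int :=
  (PySem.List.pyRange i (num + 1) 1).filter (fun d => decide (d * d ≤ num) && (PySem.Int.mod num d == 0))
def pvLarge (num i : Int) : List Int :=
  ((PySem.List.pyRange i (num + 1) 1).filter
      (fun d => decide (d * d ≤ num) && (PySem.Int.mod num d == 0) && !(d * d == num))).map
    (fun d => PySem.Int.floordiv num d)

-- one output line, as A computes it
def pvLine (num : Int) : List Char :=
  PySem.Chars.join [','] ((pvFactA num).map PySem.Int.toChars) ++ ['\n']

-- with enough fuel, the trial-division loop computes pvSmall / pvLarge
theorem pvFactorLoop_spec (num : Int) : ∀ (fuel : Nat) (i : Int), 1 ≤ i →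
    (num + 1 - i).toNat ≤ fuel → ∀ small large,
    pvFactorLoop fuel num i small large = (small ++ pvSmall num i, large ++ pvLarge num i) := by
  intro fuel
  induction fuel with
  | zero =>
    intro i h1 hf small large
    have hni : num < i := by omega
    have hnil : PySem.List.pyRange i (num + 1) 1 = [] := by
      apply PySem.List.pyRange_one_eq_nil
      omega
    simp [pvFactorLoop, pvSmall, pvLarge, hnil]
  | succ n ih =>
    intro i h1 hf small large
    by_cases hle : i * i ≤ num
    · have hi : i ≤ num := by nlinarith
      have hcons : PySem.List.pyRange i (num + 1) 1 = i :: PySem.List.pyRange (i+1) (num+1) 1 :=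
        PySem.List.pyRange_one_cons (by omega)
      have hS : pvSmall num i = if (decide (i * i ≤ num) && (PySem.Int.mod num i == 0)) then i :: pvSmall num (i+1) else pvSmall num (i+1) := by
        rw [pvSmall, hcons, List.filter_cons]; rfl
      have hL : pvLarge num i = if (decide (i * i ≤ num) && (PySem.Int.mod num i == 0) && !(i * i == num)) then PySem.Int.floordiv num i :: pvLarge num (i+1) else pvLarge num (i+1) := by
        rw [pvLarge, hcons, List.filter_cons]
        split <;> simp [pvLarge]
      rw [pvFactorLoop, if_pos hle]
      have ih' := ih (i+1) (by omega) (by omega)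
      by_cases hdvd : PySem.Int.mod num i == 0
      · by_cases hsq : i * i == num
        · rw [if_pos hdvd, if_pos hsq, ih']
          simp only [hS, hL, hle, decide_true, hdvd, hsq, Bool.and_true, if_true]
          simp
        · rw [if_pos hdvd, if_neg (by simpa using hsq), ih']
          simp only [hS, hL, hle, decide_true, hdvd, hsq, Bool.and_true, if_true]
          simp
      · rw [if_neg (by simpa using hdvd), ih']
        simp only [hS, hL, hle, decide_true, hdvd, Bool.and_false, Bool.false_and]
        simp
    · rw [pvFactorLoop, if_neg hle]
      have hfil : ∀ d ∈ PySem.List.pyRange i (num + 1) 1, ¬ (d * d ≤ num) := by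
        intro d hd
        have hmem := (PySem.List.mem_pyRange_one).mp hd
        have : i * i ≤ d * d := mul_le_mul (by omega) (by omega) (by omega) (by omega)
        omega
      have hS : pvSmall num i = [] := by
        rw [pvSmall, List.filter_eq_nil_iff]
        intro d hd
        simp [hfil d hd]
      have hL : pvLarge num i = [] := by
        rw [pvLarge, List.map_eq_nil_iff, List.filter_eq_nil_iff]
        intro d hd
        simp [hfil d hd]
      simp [hS, hL]

theorem pvPyRangePairwise (a b : Int) : (PySem.List.pyRange a b 1).Pairwise (· < ·) := by
  induction hm : (b - a).toNat generalizing a with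
  | zero =>
    have : PySem.List.pyRange a b 1 = [] := by apply PySem.List.pyRange_one_eq_nil; omega
    simp [this]
  | succ n ih =>
    rw [PySem.List.pyRange_one_cons (by omega)]
    refine List.Pairwise.cons ?_ (ih (a+1) (by omega))
    intro x hx
    have := (PySem.List.mem_pyRange_one).mp hx
    omega

theorem pvDivCancel {num d : Int} (hnum : 1 ≤ num) (hd : 1 ≤ d) (hdvd : d ∣ num) :
    1 ≤ num / d ∧ (num / d) * d = num ∧ num / d ≤ num := by
  obtain ⟨c, hc⟩ := hdvd
  have hdc : num / d = c := by
    rw [hc]; exact Int.mul_ediv_cancel_left c (by omega)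
  have hc1 : 1 ≤ c := by nlinarith
  refine ⟨by omega, by rw [hdc]; nlinarith [hc], by nlinarith [hc]⟩

-- pairing the small divisors with their cofactors gives exactly A's ascending factor list
theorem pvFact_split (num : Int) :
    pvFactA num = pvSmall num 1 ++ (pvLarge num 1).reverse := by
  by_cases hnum : 1 ≤ num
  case neg =>
    have hnil : PySem.List.pyRange 1 (num + 1) 1 = [] := by
      apply PySem.List.pyRange_one_eq_nil; omega
    simp [pvFactA, pvSmall, pvLarge, hnil]
  case pos =>
  have memA : ∀ x, x ∈ pvFactA num ↔ 1 ≤ x ∧ x ≤ num ∧ x ∣ num := by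
    intro x
    simp only [pvFactA, List.mem_filter, PySem.List.mem_pyRange_one, beq_iff_eq,
      PySem.Int.mod_eq_zero_iff_dvd]
    exact ⟨fun ⟨⟨a, b⟩, c⟩ => ⟨a, by omega, c⟩, fun ⟨a, b, c⟩ => ⟨⟨a, by omega⟩, c⟩⟩
  have memS : ∀ x, x ∈ pvSmall num 1 ↔ 1 ≤ x ∧ x * x ≤ num ∧ x ∣ num := by
    intro x
    simp only [pvSmall, List.mem_filter, PySem.List.mem_pyRange_one, Bool.and_eq_true,
      decide_eq_true_eq, beq_iff_eq, PySem.Int.mod_eq_zero_iff_dvd]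
    constructor
    · rintro ⟨⟨a, b⟩, c, d⟩; exact ⟨a, c, d⟩
    · rintro ⟨a, b, c⟩
      have : x ≤ x * x := le_mul_of_one_le_left (by omega) a
      exact ⟨⟨a, by omega⟩, b, c⟩
  have memL : ∀ x, x ∈ pvLarge num 1 ↔
      ∃ e, (1 ≤ e ∧ e * e ≤ num ∧ e ∣ num ∧ e * e ≠ num) ∧ x = num / e := by
    intro x
    simp only [pvLarge, List.mem_map, List.mem_filter, PySem.List.mem_pyRange_one,
      Bool.and_eq_true, Bool.not_eq_eq_eq_not, Bool.not_true, decide_eq_true_eq, beq_iff_eq,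
      beq_eq_false_iff_ne, ne_eq, PySem.Int.mod_eq_zero_iff_dvd]
    constructor
    · rintro ⟨e, ⟨⟨he1, _⟩, ⟨hee, hdvd⟩, hne⟩, hx⟩
      refine ⟨e, ⟨he1, hee, hdvd, hne⟩, ?_⟩
      rw [← hx, PySem.Int.floordiv_eq_ediv_of_pos (by omega)]
    · rintro ⟨e, ⟨he1, hee, hdvd, hne⟩, hx⟩
      have hx2 : x = PySem.Int.floordiv num e := by
        rw [hx, PySem.Int.floordiv_eq_ediv_of_pos (by omega)]
      have : e ≤ e * e := le_mul_of_one_le_left (by omega) he1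
      exact ⟨e, ⟨⟨he1, by omega⟩, ⟨hee, hdvd⟩, hne⟩, hx2.symm⟩
  have hpwA : (pvFactA num).Pairwise (· < ·) :=
    List.Pairwise.filter _ (pvPyRangePairwise 1 (num+1))
  have hpwS : (pvSmall num 1).Pairwise (· < ·) :=
    List.Pairwise.filter _ (pvPyRangePairwise 1 (num+1))
  have hpwL : (pvLarge num 1).reverse.Pairwise (· < ·) := by
    rw [List.pairwise_reverse]
    rw [pvLarge, List.pairwise_map]
    refine List.Pairwise.imp_of_mem ?_
      (List.Pairwise.filter _ (pvPyRangePairwise 1 (num+1)) :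
        List.Pairwise (· < ·) _)
    intro a b ha hb hab
    simp only [List.mem_filter, PySem.List.mem_pyRange_one, Bool.and_eq_true,
      decide_eq_true_eq, beq_iff_eq, Bool.not_eq_eq_eq_not, Bool.not_true,
      beq_eq_false_iff_ne, ne_eq, PySem.Int.mod_eq_zero_iff_dvd] at ha hb
    obtain ⟨⟨ha1, _⟩, ⟨haa, hadvd⟩, _⟩ := ha
    obtain ⟨⟨hb1, _⟩, ⟨hbb, hbdvd⟩, _⟩ := hb
    obtain ⟨hda1, hdaeq, _⟩ := pvDivCancel hnum ha1 hadvd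
    obtain ⟨hdb1, hdbeq, _⟩ := pvDivCancel hnum hb1 hbdvd
    rw [PySem.Int.floordiv_eq_ediv_of_pos (by omega), PySem.Int.floordiv_eq_ediv_of_pos (by omega)]
    have hlt : (num / b) * b < (num / a) * b := by nlinarith
    exact lt_of_mul_lt_mul_right hlt (by omega)
  have hcross : ∀ x ∈ pvSmall num 1, ∀ y ∈ (pvLarge num 1).reverse, x < y := by
    intro x hx y hy
    rw [List.mem_reverse] at hy
    obtain ⟨hx1, hxx, _⟩ := (memS x).mp hx
    obtain ⟨e, ⟨he1, hee, hedvd, hene⟩, hyeq⟩ := (memL y).mp hy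
    obtain ⟨hy1, hyeq2, _⟩ := pvDivCancel hnum he1 hedvd
    rw [← hyeq] at hy1 hyeq2
    have hee' : e * e < num := lt_of_le_of_ne hee hene
    have h1 : e * e < y * e := by nlinarith
    have hey : e < y := lt_of_mul_lt_mul_right h1 (by omega)
    have h2 : num < y * y := by nlinarith
    nlinarith
  have hpwR : (pvSmall num 1 ++ (pvLarge num 1).reverse).Pairwise (· < ·) := by
    rw [List.pairwise_append]
    exact ⟨hpwS, hpwL, hcross⟩
  have hmem : ∀ a, a ∈ pvFactA num ↔ a ∈ pvSmall num 1 ++ (pvLarge num 1).reverse := by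
    intro x
    rw [List.mem_append, memA, memS, List.mem_reverse, memL]
    constructor
    · rintro ⟨hx1, hx2, hdvd⟩
      by_cases hxx : x * x ≤ num
      · exact Or.inl ⟨hx1, hxx, hdvd⟩
      · right
        obtain ⟨c, hc⟩ := hdvd
        have hc1 : 1 ≤ c := by nlinarith
        have hcc : c * c < num := by nlinarith
        refine ⟨c, ⟨hc1, by omega, ⟨x, by rw [hc]; ring⟩, by omega⟩, ?_⟩
        rw [hc]
        rw [show x * c / c = x from Int.mul_ediv_cancel x (by omega)]
    · rintro (⟨hx1, hxx, hdvd⟩ | ⟨e, ⟨he1, hee, hedvd, hene⟩, hxeq⟩)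
      · have : x ≤ x * x := le_mul_of_one_le_left (by omega) hx1
        exact ⟨hx1, by omega, hdvd⟩
      · obtain ⟨hx1, hxeq2, hxle⟩ := pvDivCancel hnum he1 hedvd
        rw [← hxeq] at hx1 hxeq2 hxle
        exact ⟨hx1, hxle, ⟨e, hxeq2.symm⟩⟩
  have hperm : List.Perm (pvFactA num) (pvSmall num 1 ++ (pvLarge num 1).reverse) :=
    (List.perm_ext_iff_of_nodup hpwA.nodup hpwR.nodup).mpr hmem
  exact List.Perm.eq_of_pairwise (fun a b _ _ h1 h2 => absurd h2 (lt_asymm h1)) hpwA hpwR hperm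

-- A's indexed comma loop is a comma-join of the tail from index k on
theorem pvJoinAux (factors : List (List Char)) : ∀ (k : Nat) (acc : List Char), k ≤ factors.length →
    (PySem.List.pyRange (k : Int) (factors.length : Int) 1).foldl (fun result i =>
      if i < (factors.length : Int) - 1 then result ++ PySem.List.pyGetD factors i [] ++ [',']
      else result ++ PySem.List.pyGetD factors i []) acc
    = acc ++ PySem.Chars.join [','] (factors.drop k) := by
  intro k
  induction hn : factors.length - k generalizing k with
  | zero =>
    intro acc hk
    have hke : k = factors.length := by omega
    subst hke
    simp [PySem.List.pyRange, PySem.Chars.join_nil]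
  | succ n ih =>
    intro acc hk
    have hlt : k < factors.length := by omega
    rw [PySem.List.pyRange_one_cons (by exact_mod_cast hlt)]
    rw [List.foldl_cons]
    have hcast : ((k : Int) + 1) = ((k + 1 : Nat) : Int) := by push_cast; ring
    rw [hcast, ih (k+1) (by omega) _ (by omega)]
    have hget : PySem.List.pyGetD factors (k : Int) [] = factors[k] := by
      rw [PySem.List.pyGetD_natCast]
      simp [List.getD_eq_getElem?_getD, List.getElem?_eq_getElem hlt]
    rw [List.drop_eq_getElem_cons hlt]
    by_cases hlast : k + 1 < factors.length
    · have hif : ((k : Int) < (factors.length : Int) - 1) := by omega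
      have hdrop : factors.drop (k+1) = factors[k+1] :: factors.drop (k+2) :=
        List.drop_eq_getElem_cons hlast
      simp only [hif, if_pos, hget, hdrop, PySem.Chars.join_cons_cons]
      simp
    · have hif : ¬ ((k : Int) < (factors.length : Int) - 1) := by omega
      have hdrop : factors.drop (k+1) = [] := List.drop_eq_nil_of_le (by omega)
      simp only [hif, hget, hdrop, PySem.Chars.join_singleton]
      simp
-- joining on the empty separator is concatenation
theorem pvJoinNil (parts : List (List Char)) :
    PySem.Chars.join [] parts = parts.flatten := by
  induction parts with
  | nil => simp [PySem.Chars.join_nil]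
  | cons a rest ih =>
    cases rest with
    | nil => simp [PySem.Chars.join_singleton]
    | cons b l => simp [PySem.Chars.join_cons_cons, ih]

-- A's whole accumulation is line-by-line concatenation
theorem pvOuterA (nums : List Int) : ∀ (acc : List Char),
    nums.foldl (fun result num =>
      let factors : List (List Char) :=
        ((PySem.List.pyRange 1 (num + 1) 1).filter (fun i => PySem.Int.mod num i == 0)).map
          PySem.Int.toChars
      let result := (PySem.List.pyRange 0 (factors.length : Int) 1).foldl (fun result i =>
        let result := result ++ PySem.List.pyGetD factors i []
        if i < (factors.length : Int) - 1 then result ++ [','] else result) result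
      result ++ ['\n']) acc
    = acc ++ (nums.map pvLine).flatten := by
  induction nums with
  | nil => intro acc; simp
  | cons num rest ih =>
    intro acc
    rw [List.foldl_cons, ih]
    have hbody : ∀ (factors : List (List Char)), (fun (result : List Char) (i : Int) =>
        let result := result ++ PySem.List.pyGetD factors i []
        if i < (factors.length : Int) - 1 then result ++ [','] else result)
      = (fun result i =>
        if i < (factors.length : Int) - 1 then result ++ PySem.List.pyGetD factors i [] ++ [',']
        else result ++ PySem.List.pyGetD factors i []) := by
      intro factors
      funext result i
      by_cases h : i < (factors.length : Int) - 1 <;> simp [h]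
    dsimp only
    rw [hbody]
    rw [show (0 : Int) = ((0 : Nat) : Int) by norm_num]
    rw [pvJoinAux _ 0 acc (by omega)]
    simp [pvLine, pvFactA]
-- ===== VERDICT (by name: the statement is the Claim_ definition above) =====
theorem get_range_of_factors_spec : Claim_equal_get_range_of_factors := by
  intro start end_ _
  unfold Spec_get_range_of_factors get_range_of_factors get_range_of_factors_alt
  dsimp only
  rw [pvOuterA, pvJoinNil]
  congr 1
  simp only [List.nil_append]
  apply congrArg
  apply List.map_congr_left
  intro num _
  rw [pvFactorLoop_spec num (num.toNat + 1) 1 (by omega) (by omega) [] []]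
  dsimp only
  simp only [List.nil_append, PySem.List.slice?_none_none_neg_one, Option.getD_some]
  rw [← pvFact_split]
  rfl
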